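-- pv_equiv track=rewrite | github.com/clcain/fastPortal | fastPortal.py | _split_services_groups
-- ===== SOURCE A (Python) =====
-- def _split_services_groups(services_groups):
--     total_services_count = 0
--     total_services_count_by_group_i = {}
--     for i in range(0, len(services_groups)):
--         total_services_count += len(services_groups[i].get('services', []))
--         total_services_count_by_group_i[i] = total_services_count
--
--     services_group_midpoint_i = 0
--
--     for group_i, aggregate_services_count in total_services_count_by_group_i.items():
--         if aggregate_services_count * 2 >= total_services_count:
--             services_group_midpoint_i = group_i + 1
--             break
--
--     services_column_1 = services_groups[0:services_group_midpoint_i]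
--     services_column_2 = services_groups[services_group_midpoint_i:]
--
--     return services_column_1, services_column_2
-- ===== SOURCE B (Python) =====
-- def _split_services_groups(services_groups):
--     pre = []
--     total = 0
--     for g in services_groups:
--         total += len(g.get('services', []))
--         pre.append(total)
--     if not pre:
--         return [], []
--     # prefix sums are non-decreasing, so binary-search the leftmost
--     # index whose doubled prefix sum reaches the total
--     lo, hi = 0, len(pre) - 1
--     while lo < hi:
--         m = (lo + hi) // 2
--         if 2 * pre[m] >= total:
--             hi = m
--         else:
--             lo = m + 1
--     mid = lo + 1
--     return services_groups[:mid], services_groups[mid:]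
-- ===== Notes on version B (the rewrite author's own statement) =====
-- stated objective: alternative
-- what changed: Replaces A's dict-of-prefix-sums plus linear first-match scan by a prefix-sum array and a binary search (valid because prefix sums of nonnegative sizes are monotone) for the leftmost index whose doubled prefix reaches the total.
import Mathlib
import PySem

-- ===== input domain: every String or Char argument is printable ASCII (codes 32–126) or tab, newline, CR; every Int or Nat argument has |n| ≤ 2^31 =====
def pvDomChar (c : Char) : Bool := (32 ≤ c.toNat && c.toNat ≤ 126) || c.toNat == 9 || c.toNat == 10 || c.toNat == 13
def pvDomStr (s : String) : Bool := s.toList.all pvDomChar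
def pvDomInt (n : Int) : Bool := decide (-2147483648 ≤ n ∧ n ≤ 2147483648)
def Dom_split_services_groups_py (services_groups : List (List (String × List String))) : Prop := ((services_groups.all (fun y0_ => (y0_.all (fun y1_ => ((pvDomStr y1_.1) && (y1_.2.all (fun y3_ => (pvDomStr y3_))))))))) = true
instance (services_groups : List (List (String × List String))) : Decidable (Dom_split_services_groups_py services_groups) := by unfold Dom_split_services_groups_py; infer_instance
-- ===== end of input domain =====

-- B replaces A's dict of prefix sums + linear first-match scan by a prefix-sum array and a
-- binary search (the prefix sums are monotone) for the leftmost index whose doubled prefix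
-- reaches the total; same return value on every input (alternative algorithm).

-- ===== PORT A =====
-- len(g.get('services', []))   (g is a Python dict → association list)
def svcLen (g : List (String × List String)) : Int :=
  ((PySem.Dict.mk g).getD "services" []).length

-- A's second loop: first (i, c) of the dict's items with c*2 >= total gives mid = i+1, else 0
def aFindMid : List (Int × Int) → Int → Int
  | [], _ => 0
  | (i, c) :: rest, total => if c * 2 ≥ total then i + 1 else aFindMid rest total

def split_services_groups_py (services_groups : List (List (String × List String))) :
    (List (List (String × List String))) × (List (List (String × List String))) :=
  let st := (PySem.List.pyRange 0 (services_groups.length : Int) 1).foldl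
    (fun (st : Int × PySem.Dict Int Int) i =>
      let t := st.1 + svcLen (PySem.List.pyGetD services_groups i [])
      (t, st.2.insert i t))
    (0, PySem.Dict.empty)
  let mid := aFindMid st.2.items st.1
  (PySem.List.slice services_groups (some 0) (some mid),
   PySem.List.slice services_groups (some mid) none)

-- ===== PORT B =====
-- B's while loop: binary search for the leftmost lo with 2*pre[lo] >= total
def bsearch (pre : List Int) (total : Int) (lo hi : Int) : Int :=
  if h : lo < hi then
    let m := PySem.Int.floordiv (lo + hi) 2
    if 2 * PySem.List.pyGetD pre m 0 ≥ total then bsearch pre total lo m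
    else bsearch pre total (m + 1) hi
  else lo
termination_by (hi - lo).toNat
decreasing_by
  · have h2 : PySem.Int.floordiv (lo + hi) 2 < hi := by
      rw [PySem.Int.floordiv_lt_iff_lt_mul (by omega)]; omega
    omega
  · have h1 := PySem.Int.floordiv_two_mid_bounds (lo := lo) (hi := hi) (le_of_lt h)
    omega

def split_services_groups_py_alt (services_groups : List (List (String × List String))) :
    (List (List (String × List String))) × (List (List (String × List String))) :=
  let st := services_groups.foldl
    (fun (st : Int × List Int) g =>
      let t := st.1 + svcLen g
      (t, st.2 ++ [t]))
    ((0 : Int), ([] : List Int))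
  if st.2 = [] then ([], [])
  else
    let mid := bsearch st.2 st.1 0 ((st.2.length : Int) - 1) + 1
    (PySem.List.slice services_groups none (some mid),
     PySem.List.slice services_groups (some mid) none)

-- ===== PRECONDITION & SPEC =====
def Spec_split_services_groups_py (services_groups : List (List (String × List String))) (out : (List (List (String × List String))) × (List (List (String × List String)))) : Prop := out = split_services_groups_py_alt services_groups
instance (services_groups : List (List (String × List String))) (out : (List (List (String × List String))) × (List (List (String × List String)))) : Decidable (Spec_split_services_groups_py services_groups out) := by unfold Spec_split_services_groups_py; infer_instance

-- ===== CLAIM (what is proved, stated in full; the proofs are below) =====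
def Claim_equal_split_services_groups_py : Prop := ∀ (services_groups : List (List (String × List String))), Dom_split_services_groups_py services_groups → Spec_split_services_groups_py services_groups (split_services_groups_py services_groups)

-- ===== LEMMAS AND PROOFS =====

theorem svcLen_nonneg (g : List (String × List String)) : 0 ≤ svcLen g := by
  unfold svcLen; exact Int.natCast_nonneg _

theorem pyGetD_cons_zero (x : Int) (xs : List Int) :
    PySem.List.pyGetD (x :: xs) 0 0 = x := by
  simp [PySem.List.pyGetD, PySem.List.pyGet?, PySem.List.pyIdx?]

theorem pyGetD_cons_pos (x : Int) (xs : List Int) (j : Int)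
    (h1 : 1 ≤ j) (h2 : j < (xs.length : Int) + 1) :
    PySem.List.pyGetD (x :: xs) j 0 = PySem.List.pyGetD xs (j - 1) 0 := by
  rw [PySem.List.pyGetD_eq_getElem (x :: xs) 0 (by omega) (by simp; omega),
      PySem.List.pyGetD_eq_getElem xs 0 (by omega) (by omega)]
  have hj : j.toNat = (j - 1).toNat + 1 := by omega
  simp only [hj, List.getElem_cons_succ]

-- the (index, running prefix sum) pairs A's first loop records in its dict
def prefPairs : List (List (String × List String)) → Int → Int → List (Int × Int)
  | [], _, _ => []
  | g :: rest, s, acc => (s, acc + svcLen g) :: prefPairs rest (s + 1) (acc + svcLen g)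

theorem foldA_spec (sg : List (List (String × List String))) :
    ∀ (s acc : Int) (d : PySem.Dict Int Int), (∀ k ∈ d.keys, k < s) →
    ((PySem.List.enumerate sg s).foldl
        (fun (st : Int × PySem.Dict Int Int) p =>
          let t := st.1 + svcLen p.2
          (t, st.2.insert p.1 t)) (acc, d))
      = (sg.foldl (fun a g => a + svcLen g) acc, PySem.Dict.mk (d.items ++ prefPairs sg s acc)) := by
  induction sg with
  | nil =>
      intro s acc d _
      simp [PySem.List.enumerate_nil, prefPairs]
  | cons g rest ih =>
      intro s acc d hfresh
      have hc : d.contains s = false := by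
        rw [PySem.Dict.contains_eq_decide_mem_keys]
        simp only [decide_eq_false_iff_not]
        intro hmem
        exact absurd (hfresh s hmem) (lt_irrefl s)
      have hins : (d.insert s (acc + svcLen g)).items = d.items ++ [(s, acc + svcLen g)] :=
        PySem.Dict.items_insert_of_not_contains d (acc + svcLen g) hc
      have hfresh' : ∀ k ∈ (d.insert s (acc + svcLen g)).keys, k < s + 1 := by
        intro k hk
        rcases (PySem.Dict.mem_keys_insert d s k (acc + svcLen g)).1 hk with h | h
        · omega
        · have := hfresh k h; omega
      rw [PySem.List.enumerate_cons]
      simp only [List.foldl_cons]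
      rw [ih (s + 1) (acc + svcLen g) _ hfresh']
      simp [prefPairs, hins]

-- the linear first-match scan A's two loops amount to
def aScan : List (List (String × List String)) → Int → Int → Int → Int
  | [], _, _, _ => 0
  | g :: rest, s, running, total =>
      let r := running + svcLen g
      if r * 2 ≥ total then s + 1 else aScan rest (s + 1) r total

theorem mid_spec (sg : List (List (String × List String))) :
    ∀ (s acc total : Int), aFindMid (prefPairs sg s acc) total = aScan sg s acc total := by
  induction sg with
  | nil => intro s acc total; simp [prefPairs, aFindMid, aScan]
  | cons g rest ih =>
      intro s acc total
      simp only [prefPairs, aFindMid, aScan]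
      split_ifs with h
      · rfl
      · exact ih (s + 1) (acc + svcLen g) total

theorem foldl_pyRange_eq_enumerate (sg : List (List (String × List String)))
    (F : (Int × PySem.Dict Int Int) → (Int × List (String × List String)) → (Int × PySem.Dict Int Int))
    (init : Int × PySem.Dict Int Int) :
    (PySem.List.pyRange 0 (sg.length : Int) 1).foldl
        (fun st i => F st (i, PySem.List.pyGetD sg i [])) init
      = (PySem.List.enumerate sg 0).foldl F init := by
  rw [PySem.List.enumerate_eq_map_pyRange (d := []), List.foldl_map, PySem.List.len_eq]

-- the prefix sums B's first loop builds
def preOf : List (List (String × List String)) → Int → List Int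
  | [], _ => []
  | g :: rest, acc => (acc + svcLen g) :: preOf rest (acc + svcLen g)

theorem foldB_spec (sg : List (List (String × List String))) :
    ∀ (acc : Int) (pre0 : List Int),
    sg.foldl (fun (st : Int × List Int) g => (st.1 + svcLen g, st.2 ++ [st.1 + svcLen g])) (acc, pre0)
      = (sg.foldl (fun a g => a + svcLen g) acc, pre0 ++ preOf sg acc) := by
  induction sg with
  | nil => intro acc pre0; simp [preOf]
  | cons g rest ih =>
      intro acc pre0
      simp only [List.foldl_cons, preOf]
      rw [ih]
      simp

theorem preOf_length (sg : List (List (String × List String))) :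
    ∀ acc, (preOf sg acc).length = sg.length := by
  induction sg with
  | nil => intro acc; simp [preOf]
  | cons g rest ih => intro acc; simp [preOf, ih]

theorem mem_preOf_ge (sg : List (List (String × List String))) :
    ∀ acc x, x ∈ preOf sg acc → acc ≤ x := by
  induction sg with
  | nil => intro acc x hx; simp [preOf] at hx
  | cons g rest ih =>
      intro acc x hx
      have h0 := svcLen_nonneg g
      simp only [preOf, List.mem_cons] at hx
      rcases hx with h | h
      · omega
      · have := ih (acc + svcLen g) x h; omega

theorem pyGetD_mem (l : List Int) (j : Int) (h0 : 0 ≤ j) (h1 : j < (l.length : Int)) :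
    PySem.List.pyGetD l j 0 ∈ l := by
  rw [PySem.List.pyGetD_eq_getElem l 0 h0 h1]
  exact List.getElem_mem _

theorem preOf_mono (sg : List (List (String × List String))) :
    ∀ acc (i j : Int), 0 ≤ i → i ≤ j → j < ((preOf sg acc).length : Int) →
      PySem.List.pyGetD (preOf sg acc) i 0 ≤ PySem.List.pyGetD (preOf sg acc) j 0 := by
  induction sg with
  | nil => intro acc i j _ _ hj; simp [preOf] at hj; omega
  | cons g rest ih =>
      intro acc i j hi hij hj
      simp only [preOf, List.length_cons] at hj ⊢
      push_cast at hj
      by_cases hi0 : i = 0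
      · subst hi0
        by_cases hj0 : j = 0
        · subst hj0; exact le_refl _
        · rw [pyGetD_cons_zero, pyGetD_cons_pos _ _ _ (by omega) (by omega)]
          exact mem_preOf_ge rest (acc + svcLen g) _
            (pyGetD_mem _ _ (by omega) (by omega))
      · rw [pyGetD_cons_pos _ _ _ (by omega) (by omega),
            pyGetD_cons_pos _ _ _ (by omega) (by omega)]
        exact ih (acc + svcLen g) (i - 1) (j - 1) (by omega) (by omega) (by omega)

theorem preOf_last (sg : List (List (String × List String))) :
    ∀ acc, sg ≠ [] →
      PySem.List.pyGetD (preOf sg acc) (((preOf sg acc).length : Int) - 1) 0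
        = sg.foldl (fun a g => a + svcLen g) acc := by
  induction sg with
  | nil => intro acc h; exact absurd rfl h
  | cons g rest ih =>
      intro acc _
      by_cases hr : rest = []
      · subst hr; simp [preOf]
      · have hlen : 1 ≤ (preOf rest (acc + svcLen g)).length := by
          rw [preOf_length]
          exact List.length_pos_of_ne_nil hr
        simp only [preOf, List.length_cons, List.foldl_cons]
        push_cast
        rw [show ((preOf rest (acc + svcLen g)).length : Int) + 1 - 1
              = ((preOf rest (acc + svcLen g)).length : Int) by omega]
        rw [pyGetD_cons_pos _ _ _ (by exact_mod_cast hlen) (by omega)]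
        exact ih (acc + svcLen g) hr

theorem foldl_sum_nonneg (sg : List (List (String × List String))) :
    ∀ acc, 0 ≤ acc → 0 ≤ sg.foldl (fun a g => a + svcLen g) acc := by
  induction sg with
  | nil => intro acc h; simpa
  | cons g rest ih =>
      intro acc h
      simp only [List.foldl_cons]
      exact ih _ (by have := svcLen_nonneg g; omega)

theorem bsearch_spec (pre : List Int) (t : Int)
    (mono : ∀ (i j : Int), 0 ≤ i → i ≤ j → j < (pre.length : Int) →
      PySem.List.pyGetD pre i 0 ≤ PySem.List.pyGetD pre j 0) :
    ∀ (lo hi : Int), 0 ≤ lo → lo ≤ hi → hi < (pre.length : Int) →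
      2 * PySem.List.pyGetD pre hi 0 ≥ t →
      lo ≤ bsearch pre t lo hi ∧ bsearch pre t lo hi ≤ hi ∧
      2 * PySem.List.pyGetD pre (bsearch pre t lo hi) 0 ≥ t ∧
      (∀ j, lo ≤ j → j < bsearch pre t lo hi → ¬ 2 * PySem.List.pyGetD pre j 0 ≥ t) := by
  intro lo hi
  induction lo, hi using bsearch.induct pre t with
  | case1 lo hi h m hm ih =>
      intro h0 hle hlen hP
      have hmeq : m = PySem.Int.floordiv (lo + hi) 2 := rfl
      have hmid := PySem.Int.floordiv_two_mid_bounds (lo := lo) (hi := hi) (le_of_lt h)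
      have hmlt : PySem.Int.floordiv (lo + hi) 2 < hi := by
        rw [PySem.Int.floordiv_lt_iff_lt_mul (by omega)]; omega
      rw [← hmeq] at hmid hmlt
      rw [bsearch, dif_pos h]
      rw [← hmeq]
      rw [if_pos hm]
      obtain ⟨r1, r2, r3, r4⟩ := ih h0 (by omega) (by omega) hm
      exact ⟨r1, by omega, r3, r4⟩
  | case2 lo hi h m hm ih =>
      intro h0 hle hlen hP
      have hmeq : m = PySem.Int.floordiv (lo + hi) 2 := rfl
      have hmid := PySem.Int.floordiv_two_mid_bounds (lo := lo) (hi := hi) (le_of_lt h)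
      have hmlt : PySem.Int.floordiv (lo + hi) 2 < hi := by
        rw [PySem.Int.floordiv_lt_iff_lt_mul (by omega)]; omega
      rw [← hmeq] at hmid hmlt
      rw [bsearch, dif_pos h]
      rw [← hmeq]
      rw [if_neg hm]
      obtain ⟨r1, r2, r3, r4⟩ := ih (by omega) (by omega) hlen hP
      refine ⟨by omega, r2, r3, ?_⟩
      intro j hj1 hj2
      by_cases hjm : j ≤ m
      · intro hPj
        exact hm (by have := mono j m (by omega) hjm (by omega); omega)
      · exact r4 j (by omega) hj2
  | case3 lo hi h =>
      intro h0 hle hlen hP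
      have : lo = hi := by omega
      subst this
      rw [bsearch, dif_neg h]
      exact ⟨le_refl _, le_refl _, hP, by omega⟩

-- the linear first-match A performs, expressed on the prefix list
def linFind : List Int → Int → Int → Int
  | [], _, _ => 0
  | p :: rest, s, t => if p * 2 ≥ t then s + 1 else linFind rest (s + 1) t

theorem aScan_eq_linFind (sg : List (List (String × List String))) :
    ∀ s acc total, aScan sg s acc total = linFind (preOf sg acc) s total := by
  induction sg with
  | nil => intro s acc total; simp [aScan, preOf, linFind]
  | cons g rest ih =>
      intro s acc total
      simp only [aScan, preOf, linFind]
      split_ifs with h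
      · rfl
      · exact ih (s + 1) (acc + svcLen g) total

theorem linFind_of_least (pre : List Int) :
    ∀ (s t r : Int), 0 ≤ r → r < (pre.length : Int) →
      2 * PySem.List.pyGetD pre r 0 ≥ t →
      (∀ j, 0 ≤ j → j < r → ¬ 2 * PySem.List.pyGetD pre j 0 ≥ t) →
      linFind pre s t = s + r + 1 := by
  induction pre with
  | nil => intro s t r h0 hlen _ _; simp at hlen; omega
  | cons p rest ih =>
      intro s t r h0 hlen hP hleast
      simp only [linFind]
      by_cases hp : p * 2 ≥ t
      · rw [if_pos hp]
        have hr0 : r = 0 := by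
          by_contra hne
          exact hleast 0 (le_refl _) (by omega) (by rw [pyGetD_cons_zero]; omega)
        omega
      · rw [if_neg hp]
        have hr0 : r ≠ 0 := by
          intro hr; subst hr
          rw [pyGetD_cons_zero] at hP; omega
        simp only [List.length_cons] at hlen
        push_cast at hlen
        rw [ih (s + 1) t (r - 1) (by omega) (by omega)
              (by rw [← pyGetD_cons_pos p rest r (by omega) (by omega)]; exact hP)
              (fun j hj1 hj2 => by
                have hle := hleast (j + 1) (by omega) (by omega)
                rw [pyGetD_cons_pos p rest (j + 1) (by omega) (by omega)] at hle
                simpa using hle)]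
        omega

-- ===== VERDICT (by name: the statement is the Claim_ definition above) =====
theorem split_services_groups_py_spec : Claim_equal_split_services_groups_py := by
  intro sg _
  unfold Spec_split_services_groups_py split_services_groups_py split_services_groups_py_alt
  have hA := foldl_pyRange_eq_enumerate sg
    (fun st p => (st.1 + svcLen p.2, st.2.insert p.1 (st.1 + svcLen p.2))) (0, PySem.Dict.empty)
  have hfold := foldA_spec sg 0 0 PySem.Dict.empty (by simp [PySem.Dict.keys_empty])
  simp only at hA hfold
  rw [hA, hfold]
  have hemp : (PySem.Dict.empty : PySem.Dict Int Int).items = [] := rfl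
  rw [foldB_spec sg 0 [], hemp, List.nil_append, List.nil_append]
  by_cases hsg : sg = []
  · subst hsg
    simp [preOf, prefPairs, aFindMid, PySem.List.slice]
  · have hpre : preOf sg 0 ≠ [] := by
      intro h
      have := preOf_length sg 0
      rw [h] at this
      exact hsg (List.eq_nil_of_length_eq_zero this.symm)
    set total := sg.foldl (fun a g => a + svcLen g) 0 with htot
    set pre := preOf sg 0 with hpredef
    have hlen1 : 1 ≤ pre.length := List.length_pos_of_ne_nil hpre
    have htnn : 0 ≤ total := foldl_sum_nonneg sg 0 (le_refl _)
    have hlastP : 2 * PySem.List.pyGetD pre ((pre.length : Int) - 1) 0 ≥ total := by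
      rw [hpredef, preOf_last sg 0 hsg, ← htot]; omega
    obtain ⟨r1, r2, r3, r4⟩ := bsearch_spec pre total (preOf_mono sg 0)
      0 ((pre.length : Int) - 1) (le_refl _) (by omega) (by omega) hlastP
    have hmidA : aFindMid (prefPairs sg 0 0) total
        = bsearch pre total 0 ((pre.length : Int) - 1) + 1 := by
      rw [mid_spec, aScan_eq_linFind, ← hpredef,
          linFind_of_least pre 0 total (bsearch pre total 0 ((pre.length : Int) - 1))
            r1 (by omega) r3 (fun j hj1 hj2 => r4 j hj1 hj2)]
      omega
    simp only [if_neg hpre]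
    rw [hmidA, PySem.List.slice_zero_start]
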